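-- pv_equiv track=rewrite | github.com/Kseniameowlapka/Ksu_PYTHON | PZ6/PZ6.2.py | last_local_maximum_index
-- ===== SOURCE A (Python) =====
-- def last_local_maximum_index(arr):
--     n = len(arr)
--     if n == 0:
--         return None  # Если список пустой
--
--     for i in range(n - 1, 0, -1):
--         if arr[i] > arr[i - 1] and (i == n - 1 or arr[i] > arr[i + 1]):
--             return i  # Возвращаем индекс локального максимума
--
--     return None  # Если локальных максимумов нет
-- ===== SOURCE B (Python) =====
-- def last_local_maximum_index(arr):
--     n = len(arr)
--     # The last element is a local maximum iff it rises; it always wins if it qualifies.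
--     if n >= 2 and arr[-1] > arr[-2]:
--         return n - 1
--     # Otherwise only interior peaks remain: scan triples, keep the last peak's index.
--     best = None
--     for k, (a, b, c) in enumerate(zip(arr, arr[1:], arr[2:])):
--         if b > a and b > c:
--             best = k + 1
--     return best
-- ===== Notes on version B (the rewrite author's own statement) =====
-- stated objective: alternative
-- what changed: Replaced the uniform backward index scan with an early return by a two-stage decomposition: first a direct check whether the last element is a rising tail (which always wins), otherwise a forward scan over zipped value triples (arr, arr[1:], arr[2:]) accumulating the last interior peak index.
import Mathlib
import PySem

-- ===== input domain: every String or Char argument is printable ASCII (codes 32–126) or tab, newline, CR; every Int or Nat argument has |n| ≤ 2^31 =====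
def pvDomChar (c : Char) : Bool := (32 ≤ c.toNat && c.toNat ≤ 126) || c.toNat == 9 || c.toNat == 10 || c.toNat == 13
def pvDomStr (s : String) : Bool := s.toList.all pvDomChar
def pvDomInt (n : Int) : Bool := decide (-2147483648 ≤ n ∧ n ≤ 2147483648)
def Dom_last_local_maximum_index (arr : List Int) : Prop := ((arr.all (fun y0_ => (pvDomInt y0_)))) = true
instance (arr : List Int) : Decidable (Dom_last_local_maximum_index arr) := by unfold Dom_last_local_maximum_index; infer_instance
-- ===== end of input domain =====

-- B replaces A's uniform backward scan + early return by a two-stage decomposition: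
-- a rising-tail check (which always wins when it applies), then a forward scan over
-- zipped value triples accumulating the last interior peak (objective: alternative).

-- Both ports read arr[i] via pyGetD with default 0; every index A's loop touches is in
-- range (1 ≤ i ≤ n-1, and i+1 only when i ≠ n-1), so this is exact for the Python.

-- ===== PORT A =====
-- for i in range(n-1, 0, -1): return first i with the condition  →  find? on the countdown range
def last_local_maximum_index (arr : List Int) : Option Int :=
  let n : Int := arr.length
  if n = 0 then none
  else
    (PySem.List.pyRange (n - 1) 0 (-1)).find? (fun i =>
      decide (PySem.List.pyGetD arr i 0 > PySem.List.pyGetD arr (i - 1) 0) &&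
      (i == n - 1 || decide (PySem.List.pyGetD arr i 0 > PySem.List.pyGetD arr (i + 1) 0)))

-- ===== PORT B =====
-- if n >= 2 and arr[-1] > arr[-2]: return n-1
-- else: for k, (a, b, c) in enumerate(zip(arr, arr[1:], arr[2:])): best = k+1 when b>a and b>c
def last_local_maximum_index_alt (arr : List Int) : Option Int :=
  let n : Int := arr.length
  if 2 ≤ n ∧ PySem.List.pyGetD arr (-1) 0 > PySem.List.pyGetD arr (-2) 0 then
    some (n - 1)
  else
    (PySem.List.enumerate (arr.zip ((PySem.List.slice arr (some 1) none).zip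
        (PySem.List.slice arr (some 2) none)))).foldl
      (fun best t =>
        if (decide (t.2.2.1 > t.2.1) && decide (t.2.2.1 > t.2.2.2)) = true
        then some (t.1 + 1) else best) none

-- ===== PRECONDITION & SPEC =====
def Spec_last_local_maximum_index (arr : List Int) (out : Option Int) : Prop := out = last_local_maximum_index_alt arr
instance (arr : List Int) (out : Option Int) : Decidable (Spec_last_local_maximum_index arr out) := by unfold Spec_last_local_maximum_index; infer_instance

-- ===== CLAIM (what is proved, stated in full; the proofs are below) =====
def Claim_equal_last_local_maximum_index : Prop := ∀ (arr : List Int), Dom_last_local_maximum_index arr → Spec_last_local_maximum_index arr (last_local_maximum_index arr)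

-- ===== LEMMAS AND PROOFS =====

-- accumulate-last-with-output over a list = mapped first match over its reverse
theorem foldl_lastf_eq_find?_reverse {α β : Type} (p : α → Bool) (f : α → β)
    (l : List α) (acc : Option β) :
    l.foldl (fun best x => if p x = true then some (f x) else best) acc =
      ((l.reverse.find? p).map f).or acc := by
  induction l generalizing acc with
  | nil => simp
  | cons a l ih =>
      simp only [List.foldl_cons, List.reverse_cons, List.find?_append, ih]
      cases h : l.reverse.find? p with
      | some x => simp [Option.or]
      | none => by_cases hp : p a = true <;> simp [hp, List.find?, Option.or]

-- find? only looks at members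
theorem find?_congr_mem {α : Type} (l : List α) (p q : α → Bool)
    (h : ∀ x ∈ l, p x = q x) : l.find? p = l.find? q := by
  induction l with
  | nil => rfl
  | cons a l ih =>
      simp only [List.find?]
      rw [h a (by simp)]
      cases q a
      · exact ih (fun x hx => h x (by simp [hx]))
      · rfl

-- PySem.enumerate as a map over List.range (needed to line the two scans up)
theorem enumerate_eq_map_range {α : Type} [Inhabited α] (l : List α) (s : Int) :
    PySem.List.enumerate l s =
      (List.range l.length).map (fun k : Nat => (s + (k : Int), l.getD k default)) := by
  induction l generalizing s with
  | nil => simp [PySem.List.enumerate_nil]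
  | cons a l ih =>
      rw [PySem.List.enumerate_cons, ih]
      rw [List.length_cons, List.range_succ_eq_map, List.map_cons, List.map_map]
      congr 1
      · simp
      · apply List.map_congr_left
        intro k _
        simp only [Function.comp_apply, List.getD_cons_succ]
        congr 1
        push_cast
        ring

theorem last_local_maximum_index_eq (arr : List Int) :
    last_local_maximum_index arr = last_local_maximum_index_alt arr := by
  simp only [last_local_maximum_index, last_local_maximum_index_alt]
  by_cases h2 : 2 ≤ (arr.length : Int)
  · -- n >= 2 : peel off index n-1 on the A side
    rw [if_neg (by omega : ¬ (arr.length : Int) = 0)]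
    rw [PySem.List.pyRange_neg_one_cons (by omega : (0:Int) < (arr.length : Int) - 1)]
    have hlen2 : 2 ≤ arr.length := by omega
    have hne1 : PySem.List.pyGetD arr (-1) 0 = arr[arr.length - 1] := by
      rw [PySem.List.pyGetD_neg_ofNat arr 1 0 (by omega) (by omega)]
    have hne2 : PySem.List.pyGetD arr (-2) 0 = arr[arr.length - 2] := by
      rw [PySem.List.pyGetD_neg_ofNat arr 2 0 (by omega) (by omega)]
    have hg1 : PySem.List.pyGetD arr ((arr.length : Int) - 1) 0 = arr[arr.length - 1] := by
      rw [PySem.List.pyGetD_eq_getElem arr 0 (by omega) (by omega)]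
      congr 1
      omega
    have hg2 : PySem.List.pyGetD arr ((arr.length : Int) - 1 - 1) 0 = arr[arr.length - 2] := by
      rw [PySem.List.pyGetD_eq_getElem arr 0 (by omega) (by omega)]
      congr 1
      omega
    by_cases htail : arr[arr.length - 1] > arr[arr.length - 2]
    · -- tail rises: both return some (n - 1)
      rw [List.find?_cons_of_pos (by simp [hg1, hg2, htail])]
      rw [if_pos ⟨h2, by rw [hne1, hne2]; exact htail⟩]
    · -- tail does not rise: interior triple scan on both sides
      rw [List.find?_cons_of_neg (by simp [hg1, hg2]; omega)]
      rw [if_neg (by rw [hne1, hne2]; exact fun h => htail h.2)]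
      rw [PySem.List.slice_from arr (by norm_num : (0:Int) ≤ 1),
          PySem.List.slice_from arr (by norm_num : (0:Int) ≤ 2),
          Int.toNat_one, (show ((2:Int)).toNat = 2 from rfl)]
      rw [foldl_lastf_eq_find?_reverse, enumerate_eq_map_range]
      rw [PySem.List.pyRange_neg_one_eq_reverse,
          (show ((arr.length : Int) - 1 - 1 + 1) = (arr.length : Int) - 1 from by ring)]
      rw [PySem.List.pyRange_one]
      simp only [zero_add, Option.or_none]
      have hm : (((arr.length : Int) - 1) - 1).toNat = arr.length - 2 := by omega
      have hlz : (arr.zip ((arr.drop 1).zip (arr.drop 2))).length = arr.length - 2 := by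
        simp
        omega
      rw [hm, hlz]
      rw [← List.map_reverse, ← List.map_reverse, List.find?_map, List.find?_map]
      have hkey : ∀ k ∈ (List.range (arr.length - 2)).reverse,
          ((fun t => decide (t.2.2.1 > t.2.1) && decide (t.2.2.1 > t.2.2.2)) ∘
            (fun k : Nat => ((k : Int),
              (arr.zip ((arr.drop 1).zip (arr.drop 2))).getD k default))) k =
          ((fun i => decide (PySem.List.pyGetD arr i 0 > PySem.List.pyGetD arr (i - 1) 0) &&
              (i == (arr.length : Int) - 1 ||
               decide (PySem.List.pyGetD arr i 0 > PySem.List.pyGetD arr (i + 1) 0))) ∘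
            (fun k : Nat => 1 + (k : Int))) k := by
        intro k hk
        have hkm : k < arr.length - 2 := List.mem_range.mp (List.mem_reverse.mp hk)
        have hget : (arr.zip ((arr.drop 1).zip (arr.drop 2))).getD k default =
            (arr[k]'(by omega), (arr[k + 1]'(by omega), arr[k + 2]'(by omega))) := by
          rw [List.getD_eq_getElem _ _ (by rw [hlz]; exact hkm)]
          simp [List.getElem_zip, List.getElem_drop]
          congr 1
          omega
        have e1 : PySem.List.pyGetD arr (1 + (k : Int)) 0 = arr[k + 1]'(by omega) := by
          rw [PySem.List.pyGetD_eq_getElem arr 0 (by omega) (by omega)]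
          congr 1
          omega
        have e0 : PySem.List.pyGetD arr (1 + (k : Int) - 1) 0 = arr[k]'(by omega) := by
          rw [PySem.List.pyGetD_eq_getElem arr 0 (by omega) (by omega)]
          congr 1
          omega
        have e2 : PySem.List.pyGetD arr (1 + (k : Int) + 1) 0 = arr[k + 2]'(by omega) := by
          rw [PySem.List.pyGetD_eq_getElem arr 0 (by omega) (by omega)]
          congr 1
          omega
        have hne : ((1 + (k : Int)) == (arr.length : Int) - 1) = false := by
          simp
          omega
        simp only [Function.comp_apply, hget, e0, e1, e2, hne, Bool.false_or]
      rw [find?_congr_mem _ _ _ hkey]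
      cases hr : (List.range (arr.length - 2)).reverse.find?
          ((fun i => decide (PySem.List.pyGetD arr i 0 > PySem.List.pyGetD arr (i - 1) 0) &&
              (i == (arr.length : Int) - 1 ||
               decide (PySem.List.pyGetD arr i 0 > PySem.List.pyGetD arr (i + 1) 0))) ∘
            (fun k : Nat => 1 + (k : Int))) with
      | none => simp
      | some k =>
          simp
          ring
  · -- n <= 1 : A's loop range and B's triple list are both empty
    have hlen : arr.length ≤ 1 := by omega
    have hz : (arr.zip ((PySem.List.slice arr (some 1) none).zip
        (PySem.List.slice arr (some 2) none))) = [] := by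
      rw [PySem.List.slice_from arr (by norm_num : (0:Int) ≤ 1)]
      cases arr with
      | nil => simp
      | cons a t =>
          have ht : t = [] := by
            simp only [List.length_cons] at hlen
            exact List.length_eq_zero_iff.mp (by omega)
          subst ht
          simp
    by_cases h0 : (arr.length : Int) = 0
    · rw [if_pos h0]
      rw [if_neg (show ¬ (2 ≤ (arr.length : Int) ∧
            PySem.List.pyGetD arr (-1) 0 > PySem.List.pyGetD arr (-2) 0) from fun h => h2 h.1)]
      rw [hz, PySem.List.enumerate_nil]
      rfl
    · rw [if_neg h0]
      rw [if_neg (show ¬ (2 ≤ (arr.length : Int) ∧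
            PySem.List.pyGetD arr (-1) 0 > PySem.List.pyGetD arr (-2) 0) from fun h => h2 h.1)]
      rw [hz, PySem.List.enumerate_nil]
      rw [PySem.List.pyRange_neg_one_eq_nil (by omega : (arr.length : Int) - 1 ≤ 0)]
      rfl

-- ===== VERDICT (by name: the statement is the Claim_ definition above) =====
theorem last_local_maximum_index_spec : Claim_equal_last_local_maximum_index := by
  intro arr _
  unfold Spec_last_local_maximum_index
  exact last_local_maximum_index_eq arr
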